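-- pv_equiv track=rewrite | github.com/devKarin/beginner_python | EX/ex03_idcode/idcode.py | get_full_year
-- ===== SOURCE A (Python) =====
-- def get_full_year(gender_number: int, year_number: int) -> int:
--     """Define the 4-digit year when given person was born."""
--     # Define gender number and year prefix relationship.
--     year_number_prefix = {"18": [1, 2], "19": [3, 4], "20": [5, 6]}
--     # Convert year number into string.
--     year_number = str(year_number)
--     # Add leading zero if year number has one digit
--     if len(year_number) == 1:
--         year_number = "0" + year_number
--
--     for key, value in year_number_prefix.items():
--         if gender_number in value:
--             return int(str(key) + year_number)
-- ===== SOURCE B (Python) =====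
-- def get_full_year(gender_number: int, year_number: int) -> int:
--     """Define the 4-digit year when given person was born."""
--     year_string = str(year_number)
--     if len(year_string) == 1:
--         year_string = "0" + year_string
--     if 1 <= gender_number <= 6:
--         return int(str(18 + (gender_number - 1) // 2) + year_string)
-- ===== Notes on version B (the rewrite author's own statement) =====
-- stated objective: simpler
-- what changed: The century prefix 18/19/20 is computed by the closed form 18 + (gender_number-1)//2 behind a single range check, replacing the dict of prefix->gender-list pairs and the loop with membership tests.
-- outside the precondition, e.g. on get_full_year(7, 50): A returns None, B returns None; on get_full_year(1, -5): A raises ValueError, B raises ValueError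
import Mathlib
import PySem

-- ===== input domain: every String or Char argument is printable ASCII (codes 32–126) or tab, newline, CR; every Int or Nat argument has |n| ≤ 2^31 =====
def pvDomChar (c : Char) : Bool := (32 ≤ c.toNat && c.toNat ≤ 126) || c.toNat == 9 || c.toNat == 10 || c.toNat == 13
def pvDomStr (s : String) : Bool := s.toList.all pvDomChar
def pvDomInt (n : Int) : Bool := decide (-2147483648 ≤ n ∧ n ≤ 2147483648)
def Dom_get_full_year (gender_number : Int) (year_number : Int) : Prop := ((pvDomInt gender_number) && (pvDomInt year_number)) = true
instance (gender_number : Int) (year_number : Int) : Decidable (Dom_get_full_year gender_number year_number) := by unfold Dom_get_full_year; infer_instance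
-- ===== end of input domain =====

-- B replaces A's dict-of-prefixes loop by the closed-form century 18 + (gender-1)//2 behind one range check (simpler).
-- Outside the padded-year string build, Python returns None (no int) for gender outside 1..6 and raises ValueError
-- for negative years; both are excluded by Pre_ and the ports return 0 there.

-- ===== PORT A =====
-- helper: the padded year string (str(year_number), with a leading zero if one digit)
def pvYearString (year_number : Int) : String :=
  let s := PySem.Int.toStr year_number
  if PySem.Str.len s = 1 then "0" ++ s else s

-- the for-loop over the dict's (key, value) items, returning on the first membership hit; fall-through = None → 0
def pvLoopA (gender_number : Int) (ys : String) : List (String × List Int) → Int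
  | [] => 0  -- Python falls through and returns None (outside Pre_)
  | (key, value) :: rest =>
    if gender_number ∈ value then (PySem.Int.ofStr? (key ++ ys)).getD 0
    else pvLoopA gender_number ys rest

def get_full_year (gender_number : Int) (year_number : Int) : Int :=
  let year_number_prefix : List (String × List Int) := [("18", [1, 2]), ("19", [3, 4]), ("20", [5, 6])]
  let ys := pvYearString year_number
  pvLoopA gender_number ys year_number_prefix

-- ===== PORT B =====
def get_full_year_alt (gender_number : Int) (year_number : Int) : Int :=
  let ys := pvYearString year_number
  if 1 ≤ gender_number ∧ gender_number ≤ 6 then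
    (PySem.Int.ofStr? (PySem.Int.toStr (18 + PySem.Int.floordiv (gender_number - 1) 2) ++ ys)).getD 0
  else 0  -- Python returns None here (outside Pre_)

-- ===== PRECONDITION & SPEC =====
-- Pre_ keeps exactly the inputs where Python A returns an int: gender 1..6 (else A returns None,
-- not an int) and a non-negative year (else int("18" + "-…") raises ValueError).
def Pre_get_full_year (gender_number : Int) (year_number : Int) : Prop :=
  (1 ≤ gender_number ∧ gender_number ≤ 6) ∧ 0 ≤ year_number
instance (gender_number : Int) (year_number : Int) : Decidable (Pre_get_full_year gender_number year_number) := by unfold Pre_get_full_year; infer_instance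
def pvWitness_get_full_year : Int × Int := (3, 7)

def Spec_get_full_year (gender_number : Int) (year_number : Int) (out : Int) : Prop := out = get_full_year_alt gender_number year_number
instance (gender_number : Int) (year_number : Int) (out : Int) : Decidable (Spec_get_full_year gender_number year_number out) := by unfold Spec_get_full_year; infer_instance

-- ===== CLAIM (what is proved, stated in full; the proofs are below) =====
def Claim_equal_get_full_year : Prop := ∀ (gender_number : Int) (year_number : Int), Dom_get_full_year gender_number year_number → Pre_get_full_year gender_number year_number → Spec_get_full_year gender_number year_number (get_full_year gender_number year_number)

-- ===== LEMMAS AND PROOFS =====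

-- ===== VERDICT (by name: the statement is the Claim_ definition above) =====
theorem get_full_year_spec : Claim_equal_get_full_year := by
  intro g y _ hpre
  obtain ⟨⟨h1, h6⟩, _⟩ := hpre
  unfold Spec_get_full_year get_full_year get_full_year_alt pvLoopA
  interval_cases g <;> simp [pvLoopA, PySem.Int.floordiv] <;> rfl
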